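-- pv_equiv track=rewrite | github.com/pypi-data/pypi-mirror-314 | packages/hslSixColor/hslSixColor-0.1.4-py3-none-any.whl/hslSxColor/main.py | zigzag_scan
-- ===== SOURCE A (Python) =====
-- def zigzag_scan(width, height):
--     """
--     生成Z字形扫描顺序
--
--     :param width: 图像宽度
--     :param height: 图像高度
--     :return: Z字形扫描的坐标列表
--     """
--     scan = []
--     for i in range(width + height - 1):
--         if i % 2 == 0:
--             for y in range(i + 1):
--                 x = i - y
--                 if x < width and y < height:
--                     scan.append((x, y))
--         else:
--             for x in range(i + 1):
--                 y = i - x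
--                 if x < width and y < height:
--                     scan.append((x, y))
--     return scan
-- ===== SOURCE B (Python) =====
-- def zigzag_scan(width, height):
--     """Sort all grid cells by their zigzag rank (diagonal, then position along it)."""
--     if width <= 0 or height <= 0:
--         return []
--     m = width + height
--
--     def rank(cell):
--         x, y = cell
--         i = x + y
--         return i * m + (y if i % 2 == 0 else x)
--
--     return sorted(((x, y) for y in range(height) for x in range(width)), key=rank)
-- ===== Notes on version B (the rewrite author's own statement) =====
-- stated objective: alternative
-- what changed: B discards A's outer loop over diagonals with an inner generate-and-filter scan entirely: it enumerates the grid cells once in row-major order and sorts them by a zigzag rank key (diagonal index, then the position along the diagonal that matches the diagonal's parity), relying on the fact that the ranks of A's output are strictly increasing.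
import Mathlib
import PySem

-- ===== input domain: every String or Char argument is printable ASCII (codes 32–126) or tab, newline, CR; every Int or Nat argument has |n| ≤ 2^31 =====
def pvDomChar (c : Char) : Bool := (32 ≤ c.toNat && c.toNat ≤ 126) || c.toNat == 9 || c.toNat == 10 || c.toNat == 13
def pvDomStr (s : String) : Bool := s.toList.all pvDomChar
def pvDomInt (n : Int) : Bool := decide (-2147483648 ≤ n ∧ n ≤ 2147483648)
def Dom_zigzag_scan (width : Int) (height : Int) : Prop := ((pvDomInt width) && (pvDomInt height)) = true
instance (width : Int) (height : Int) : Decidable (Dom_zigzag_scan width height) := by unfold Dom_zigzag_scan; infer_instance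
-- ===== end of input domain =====

-- B replaces A's diagonal-by-diagonal generate-and-filter loops by a sort of all grid
-- cells under a zigzag rank key (objective: alternative algorithm; no speed claim).

-- ===== PORT A =====
def zigzag_scan (width : Int) (height : Int) : List (Int × Int) :=
  (PySem.List.pyRange 0 (width + height - 1) 1).foldl (fun scan i =>
    if PySem.Int.mod i 2 = 0 then
      (PySem.List.pyRange 0 (i + 1) 1).foldl (fun acc y =>
        if i - y < width ∧ y < height then acc ++ [(i - y, y)] else acc) scan
    else
      (PySem.List.pyRange 0 (i + 1) 1).foldl (fun acc x =>
        if x < width ∧ i - x < height then acc ++ [(x, i - x)] else acc) scan) []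

-- ===== PORT B =====
-- rank(cell): the zigzag key i*m + (y if i even else x), i = x + y, m = width + height
def zzRank (m : Int) (c : Int × Int) : Int :=
  (c.1 + c.2) * m + (if PySem.Int.mod (c.1 + c.2) 2 = 0 then c.2 else c.1)

def zigzag_scan_alt (width : Int) (height : Int) : List (Int × Int) :=
  if width ≤ 0 ∨ height ≤ 0 then []
  else PySem.List.sorted
    ((PySem.List.pyRange 0 height 1).flatMap (fun y =>
      (PySem.List.pyRange 0 width 1).map (fun x => (x, y))))
    (zzRank (width + height)) false

-- ===== PRECONDITION & SPEC =====
def Spec_zigzag_scan (width : Int) (height : Int) (out : List (Int × Int)) : Prop := out = zigzag_scan_alt width height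
instance (width : Int) (height : Int) (out : List (Int × Int)) : Decidable (Spec_zigzag_scan width height out) := by unfold Spec_zigzag_scan; infer_instance

-- ===== CLAIM (what is proved, stated in full; the proofs are below) =====
def Claim_equal_zigzag_scan : Prop := ∀ (width : Int) (height : Int), Dom_zigzag_scan width height → Spec_zigzag_scan width height (zigzag_scan width height)

-- ===== LEMMAS AND PROOFS =====

-- the canonical diagonal list (proof artifact): A's inner loop output for diagonal i
def zzDiagA (w h i : Int) : List (Int × Int) :=
  if PySem.Int.mod i 2 = 0 then
    ((PySem.List.pyRange 0 (i + 1) 1).filter (fun y => decide (i - y < w ∧ y < h))).map (fun y => (i - y, y))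
  else
    ((PySem.List.pyRange 0 (i + 1) 1).filter (fun x => decide (x < w ∧ i - x < h))).map (fun x => (x, i - x))

def zzCanon (w h : Int) : List (Int × Int) :=
  (PySem.List.pyRange 0 (w + h - 1) 1).flatMap (zzDiagA w h)

theorem diag_loop_eq (w h i : Int) (scan : List (Int × Int)) :
    (if PySem.Int.mod i 2 = 0 then
      (PySem.List.pyRange 0 (i + 1) 1).foldl (fun acc y =>
        if i - y < w ∧ y < h then acc ++ [(i - y, y)] else acc) scan
    else
      (PySem.List.pyRange 0 (i + 1) 1).foldl (fun acc x =>
        if x < w ∧ i - x < h then acc ++ [(x, i - x)] else acc) scan)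
    = scan ++ zzDiagA w h i := by
  unfold zzDiagA
  split_ifs with hp
  · rw [PySem.List.foldl_append_ite (fun y => i - y < w ∧ y < h) (fun y => (i - y, y))]
  · rw [PySem.List.foldl_append_ite (fun x => x < w ∧ i - x < h) (fun x => (x, i - x))]

theorem A_eq_canon (w h : Int) : zigzag_scan w h = zzCanon w h := by
  unfold zigzag_scan zzCanon
  have h1 := PySem.List.foldl_congr_mem
      (l := PySem.List.pyRange 0 (w + h - 1) 1) (init := ([] : List (Int × Int)))
      (f := fun scan i =>
        if PySem.Int.mod i 2 = 0 then
          (PySem.List.pyRange 0 (i + 1) 1).foldl (fun acc y =>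
            if i - y < w ∧ y < h then acc ++ [(i - y, y)] else acc) scan
        else
          (PySem.List.pyRange 0 (i + 1) 1).foldl (fun acc x =>
            if x < w ∧ i - x < h then acc ++ [(x, i - x)] else acc) scan)
      (g := fun scan i => scan ++ zzDiagA w h i)
      (by intro acc i _; exact diag_loop_eq w h i acc)
  rw [h1, PySem.List.foldl_append_eq_flatMap]
  simp

theorem mem_zzDiagA (w h i : Int) (c : Int × Int) :
    c ∈ zzDiagA w h i ↔ c.1 + c.2 = i ∧ 0 ≤ c.1 ∧ c.1 < w ∧ 0 ≤ c.2 ∧ c.2 < h := by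
  obtain ⟨x, y⟩ := c
  unfold zzDiagA
  split_ifs with hp <;>
    simp only [List.mem_map, List.mem_filter, PySem.List.mem_pyRange_one,
      decide_eq_true_eq, Prod.mk.injEq] <;>
    constructor
  · rintro ⟨a, ⟨⟨ha1, ha2⟩, hb1, hb2⟩, rfl, rfl⟩; omega
  · rintro ⟨hs, h1, h2, h3, h4⟩; exact ⟨y, ⟨⟨by omega, by omega⟩, by omega, by omega⟩, by omega, rfl⟩
  · rintro ⟨a, ⟨⟨ha1, ha2⟩, hb1, hb2⟩, rfl, rfl⟩; omega
  · rintro ⟨hs, h1, h2, h3, h4⟩; exact ⟨x, ⟨⟨by omega, by omega⟩, by omega, by omega⟩, rfl, by omega⟩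

theorem pairwise_zzDiagA (w h m i : Int) :
    (zzDiagA w h i).Pairwise (fun a b => zzRank m a < zzRank m b) := by
  unfold zzDiagA
  split_ifs with hp
  · refine List.Pairwise.map _ ?_ (List.Pairwise.filter _ (PySem.List.pairwise_lt_pyRange_one 0 (i + 1)))
    intro a b hab
    simp only [zzRank]
    have ha : i - a + a = i := by omega
    have hb : i - b + b = i := by omega
    rw [ha, hb, if_pos hp]
    omega
  · refine List.Pairwise.map _ ?_ (List.Pairwise.filter _ (PySem.List.pairwise_lt_pyRange_one 0 (i + 1)))
    intro a b hab
    simp only [zzRank]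
    have ha : a + (i - a) = i := by omega
    have hb : b + (i - b) = i := by omega
    rw [ha, hb, if_neg hp]
    omega

theorem zzRank_cross (w h i j : Int) (hij : i < j) (a b : Int × Int)
    (ha : a ∈ zzDiagA w h i) (hb : b ∈ zzDiagA w h j) :
    zzRank (w + h) a < zzRank (w + h) b := by
  rw [mem_zzDiagA] at ha hb
  obtain ⟨hsa, ha1, ha2, ha3, ha4⟩ := ha
  obtain ⟨hsb, hb1, hb2, hb3, hb4⟩ := hb
  simp only [zzRank, hsa, hsb]
  have hm : (0 : Int) < w + h := by omega
  have hkey : i * (w + h) + (w + h) ≤ j * (w + h) := by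
    have := mul_le_mul_of_nonneg_right (show i + 1 ≤ j by omega) (le_of_lt hm)
    linarith [this, add_mul i 1 (w + h)]
  have haux : a.2 < w + h ∧ a.1 < w + h ∧ 0 ≤ b.1 ∧ 0 ≤ b.2 := by omega
  split_ifs <;> linarith [haux.1, haux.2.1, haux.2.2.1, haux.2.2.2]

theorem pairwise_canon (w h : Int) :
    (zzCanon w h).Pairwise (fun a b => zzRank (w + h) a < zzRank (w + h) b) := by
  unfold zzCanon
  rw [List.pairwise_flatMap]
  refine ⟨fun i _ => pairwise_zzDiagA w h (w + h) i, ?_⟩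
  exact List.Pairwise.imp_of_mem
    (fun {i j} _ _ hij a ha b hb => zzRank_cross w h i j hij a b ha hb)
    (PySem.List.pairwise_lt_pyRange_one 0 (w + h - 1))

theorem nodup_canon (w h : Int) : (zzCanon w h).Nodup :=
  (pairwise_canon w h).imp (fun {a b} hlt heq => by subst heq; exact lt_irrefl _ hlt)

theorem mem_canon (w h : Int) (c : Int × Int) :
    c ∈ zzCanon w h ↔ 0 ≤ c.1 ∧ c.1 < w ∧ 0 ≤ c.2 ∧ c.2 < h := by
  unfold zzCanon
  simp only [List.mem_flatMap, mem_zzDiagA, PySem.List.mem_pyRange_one]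
  constructor
  · rintro ⟨i, ⟨hi1, hi2⟩, hs, hx1, hx2, hy1, hy2⟩; exact ⟨hx1, hx2, hy1, hy2⟩
  · rintro ⟨hx1, hx2, hy1, hy2⟩; exact ⟨c.1 + c.2, ⟨by omega, by omega⟩, rfl, hx1, hx2, hy1, hy2⟩

theorem mem_grid (w h : Int) (c : Int × Int) :
    c ∈ (PySem.List.pyRange 0 h 1).flatMap (fun y =>
      (PySem.List.pyRange 0 w 1).map (fun x => (x, y))) ↔
    0 ≤ c.1 ∧ c.1 < w ∧ 0 ≤ c.2 ∧ c.2 < h := by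
  obtain ⟨x, y⟩ := c
  simp only [List.mem_flatMap, List.mem_map, PySem.List.mem_pyRange_one, Prod.mk.injEq]
  constructor
  · rintro ⟨b, ⟨hb1, hb2⟩, a, ⟨ha1, ha2⟩, rfl, rfl⟩; exact ⟨ha1, ha2, hb1, hb2⟩
  · rintro ⟨hx1, hx2, hy1, hy2⟩; exact ⟨y, ⟨hy1, hy2⟩, x, ⟨hx1, hx2⟩, rfl, rfl⟩

theorem nodup_grid (w h : Int) :
    ((PySem.List.pyRange 0 h 1).flatMap (fun y =>
      (PySem.List.pyRange 0 w 1).map (fun x => (x, y)))).Nodup := by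
  rw [List.nodup_iff_pairwise_ne, List.pairwise_flatMap]
  constructor
  · intro y _
    refine List.Pairwise.map _ ?_ (PySem.List.pairwise_lt_pyRange_one 0 w)
    intro a b hab heq
    simp only [Prod.mk.injEq] at heq
    omega
  · refine List.Pairwise.imp_of_mem ?_ (PySem.List.pairwise_lt_pyRange_one 0 h)
    rintro y1 y2 _ _ h12 a ha b hb heq
    simp only [List.mem_map] at ha hb
    obtain ⟨x1, _, rfl⟩ := ha
    obtain ⟨x2, _, rfl⟩ := hb
    simp only [Prod.mk.injEq] at heq
    omega

-- ===== VERDICT (by name: the statement is the Claim_ definition above) =====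
theorem zigzag_scan_spec : Claim_equal_zigzag_scan := by
  intro w h _
  unfold Spec_zigzag_scan zigzag_scan_alt
  rw [A_eq_canon]
  split_ifs with hdeg
  · rw [List.eq_nil_iff_forall_not_mem]
    intro c hc
    rw [mem_canon] at hc
    omega
  refine (PySem.List.sorted_eq_of_perm_of_pairwise_lt _ (zzCanon w h) (zzRank (w + h)) ?_ (pairwise_canon w h)).symm
  refine (List.perm_ext_iff_of_nodup (nodup_canon w h) (nodup_grid w h)).mpr ?_
  intro c
  rw [mem_canon, mem_grid]
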